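-- pv_equiv track=rewrite | github.com/euetova/HSE | prog3/Tests.py | kwiq
-- ===== SOURCE A (Python) =====
-- def to_table(snippets, word):
-- 	""" create table using 'format' methods
--     :param snippets - snippets
--     :param word: str - keyword
--     :return: array - table of snippets
-- 	"""
-- 	table = []
-- 	len_word = len(word)
-- 	max_snippets = max([len(snippets[i][0]) for i in range(len(snippets))])
-- 	for i in range(len(snippets)):
-- 		len_snippets = len(snippets[i][0])
-- 		row = '{:>{max_snippets}}	{:^{len_word}}	{}'.format(snippets[i][0], word, snippets[i][2], max_snippets = max_snippets, len_word = len_word)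
-- 		table.append(row+'\n')
-- 	return table
--
-- def kwiq(word, text, num=3):
-- 	""" create snippets
--     :param word: str - keyword
--     :param text: string - text
--     :param num: - int - length of contexts of snippets
--     :return: array - table of snippets
--     """
-- 	lst = text.lower().split()
-- 	positions = []
-- 	for i in range(len(lst)):
-- 		if lst[i] == word:
-- 			positions.append(i)
-- 	snippets = [['' for i in range(num)] for p in range(len(positions))]
-- 	for i in range(len(snippets)):
-- 		if positions[i] < num+1:
-- 			snippets[i][0] = ' '.join(lst[:positions[i]])
-- 		else:
-- 			snippets[i][0] = ' '.join(lst[positions[i]-num:positions[i]])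
-- 		snippets[i][1] = word
-- 		if positions[i] > len(lst)-(num+2):
-- 			snippets[i][2] = ' '.join(lst[positions[i]+1:])
-- 		else:
-- 			snippets[i][2] = ' '.join(lst[positions[i]+1:positions[i]+1+num])
-- 	return to_table(snippets, word)
-- ===== SOURCE B (Python) =====
-- def kwiq(word, text, num=3):
--     lst = text.lower().split()
--     # forward streaming pass: sliding window of the last `num` words -> left contexts
--     lefts = []
--     window = []
--     for w in lst:
--         if w == word:
--             lefts.append(' '.join(window))
--         window.append(w)
--         if len(window) > num:
--             del window[0]
--     # backward streaming pass: lookahead of the next `num` words -> right contexts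
--     rights_rev = []
--     ahead = []
--     for w in reversed(lst):
--         if w == word:
--             rights_rev.append(' '.join(ahead))
--         ahead.insert(0, w)
--         if len(ahead) > num:
--             del ahead[num:]
--     width = max(map(len, lefts))
--     return [l.rjust(width) + '\t' + word + '\t' + r + '\n'
--             for l, r in zip(lefts, reversed(rights_rev))]
-- ===== Notes on version B (the rewrite author's own statement) =====
-- stated objective: alternative
-- what changed: Replaces A's index-driven pipeline (positions loop, pre-allocated snippet matrix mutated with four boundary branches over slices, then an index-driven table pass) with two streaming sliding-window passes that use no indices or slices at all: a forward pass maintaining the last `num` words emits the left context at each match, a backward pass maintaining the next `num` words emits the right context, and the two context lists are zipped and formatted.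
import Mathlib
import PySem

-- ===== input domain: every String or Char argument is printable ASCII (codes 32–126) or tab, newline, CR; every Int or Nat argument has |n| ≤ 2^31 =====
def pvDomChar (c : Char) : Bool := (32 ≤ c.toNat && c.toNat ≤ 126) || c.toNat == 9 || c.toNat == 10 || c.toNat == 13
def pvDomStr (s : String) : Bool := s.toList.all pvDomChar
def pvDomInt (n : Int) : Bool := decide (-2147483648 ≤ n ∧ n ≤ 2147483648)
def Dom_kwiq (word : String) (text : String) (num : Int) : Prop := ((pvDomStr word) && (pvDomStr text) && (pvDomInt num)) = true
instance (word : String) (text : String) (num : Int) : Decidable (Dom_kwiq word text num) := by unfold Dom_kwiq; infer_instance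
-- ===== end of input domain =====

-- B replaces A's index/slice pipeline (positions loop, matrix-mutation loop with boundary
-- branches, table loop) by two streaming sliding-window passes (forward for left contexts,
-- backward for right contexts) zipped together: no indices, no slices, no boundary branches.


-- ===== PORT A =====
-- '{:>{w}}'.format(s): right-justify with spaces (shared formatting helper, = str.rjust)
def pyRjust (s : String) (w : Int) : String :=
  String.ofList (List.replicate (w - PySem.Str.len s).toNat ' ') ++ s

-- '{:^{w}}'.format(s): centre with spaces, extra space on the right
def pyCenter (s : String) (w : Int) : String :=
  let pad := w - PySem.Str.len s
  if pad ≤ 0 then s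
  else
    let l := PySem.Int.floordiv pad 2
    String.ofList (List.replicate l.toNat ' ') ++ s ++ String.ofList (List.replicate (pad - l).toNat ' ')

-- literal port of to_table (A raises ValueError on empty snippets: outside Pre_, getD 0 there)
def to_table (snippets : List (List String)) (word : String) : List String :=
  let len_word := PySem.Str.len word
  let max_snippets := (PySem.List.max?
      ((PySem.List.pyRange 0 (snippets.length : Int) 1).map
        (fun i => PySem.Str.len (PySem.List.pyGetD (PySem.List.pyGetD snippets i []) 0 "")))
      (fun x => x)).getD 0
  (PySem.List.pyRange 0 (snippets.length : Int) 1).foldl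
    (fun table i =>
      let row := pyRjust (PySem.List.pyGetD (PySem.List.pyGetD snippets i []) 0 "") max_snippets
          ++ "\t" ++ pyCenter word len_word ++ "\t"
          ++ PySem.List.pyGetD (PySem.List.pyGetD snippets i []) 2 ""
      table ++ [row ++ "\n"]) []

def kwiq (word : String) (text : String) (num : Int) : List String :=
  let lst := PySem.Str.split₀ (PySem.Str.lower text)
  let positions := (PySem.List.pyRange 0 (lst.length : Int) 1).foldl
    (fun ps i => if PySem.List.pyGetD lst i "" == word then ps ++ [i] else ps) []
  let snippets0 : List (List String) :=
    (List.range positions.length).map (fun _ => (PySem.List.pyRange 0 num 1).map (fun _ => ""))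
  let snippets := (PySem.List.pyRange 0 (snippets0.length : Int) 1).foldl
    (fun sn i =>
      let p := PySem.List.pyGetD positions i 0
      let row := PySem.List.pyGetD sn i []
      let row := PySem.List.pySetD row 0
        (if p < num + 1 then PySem.Str.join " " (PySem.List.slice lst none (some p))
         else PySem.Str.join " " (PySem.List.slice lst (some (p - num)) (some p)))
      let row := PySem.List.pySetD row 1 word
      let row := PySem.List.pySetD row 2
        (if p > (lst.length : Int) - (num + 2) then PySem.Str.join " " (PySem.List.slice lst (some (p + 1)) none)
         else PySem.Str.join " " (PySem.List.slice lst (some (p + 1)) (some (p + 1 + num))))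
      PySem.List.pySetD sn i row) snippets0
  to_table snippets word

-- ===== PORT B =====
-- two streaming passes: forward with a sliding window of the last `num` words (left contexts),
-- backward with a lookahead of the next `num` words (right contexts), then zip
def kwiq_alt (word : String) (text : String) (num : Int) : List String :=
  let lst := PySem.Str.split₀ (PySem.Str.lower text)
  let fwd := lst.foldl
    (fun (s : List String × List String) w =>
      let lefts := if w == word then s.1 ++ [PySem.Str.join " " s.2] else s.1
      let window := s.2 ++ [w]
      (lefts, if (window.length : Int) > num then window.drop 1 else window))
    ([], [])
  let bwd := lst.reverse.foldl
    (fun (s : List String × List String) w =>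
      let rights := if w == word then s.1 ++ [PySem.Str.join " " s.2] else s.1
      let ahead := w :: s.2
      (rights, if (ahead.length : Int) > num then ahead.take num.toNat else ahead))
    ([], [])
  let width := (PySem.List.max? (fwd.1.map PySem.Str.len) (fun x => x)).getD 0
  (fwd.1.zip bwd.1.reverse).map
    (fun p => pyRjust p.1 width ++ "\t" ++ word ++ "\t" ++ p.2 ++ "\n")

-- ===== PRECONDITION & SPEC =====
-- Pre_ excludes exactly the inputs where A raises: num < 3 (IndexError writing row[0..2] into a
-- row of length num) or word absent from the lowered word list (ValueError: max of empty list).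
def Pre_kwiq (word : String) (text : String) (num : Int) : Prop :=
  3 ≤ num ∧ word ∈ PySem.Str.split₀ (PySem.Str.lower text)
instance (word : String) (text : String) (num : Int) : Decidable (Pre_kwiq word text num) := by
  unfold Pre_kwiq; infer_instance
def pvWitness_kwiq : String × String × Int := ("fox", "The quick brown Fox jumps over the lazy dog", 3)

def Spec_kwiq (word : String) (text : String) (num : Int) (out : List String) : Prop := out = kwiq_alt word text num
instance (word : String) (text : String) (num : Int) (out : List String) : Decidable (Spec_kwiq word text num out) := by unfold Spec_kwiq; infer_instance

-- ===== CLAIM (what is proved, stated in full; the proofs are below) =====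
def Claim_equal_kwiq : Prop := ∀ (word : String) (text : String) (num : Int), Dom_kwiq word text num → Pre_kwiq word text num → Spec_kwiq word text num (kwiq word text num)
-- ===== LEMMAS AND PROOFS =====

theorem pyCenter_self (s : String) : pyCenter s (PySem.Str.len s) = s := by
  simp [pyCenter]

theorem filterMap_ite {α β : Type} (p : α → Bool) (f : α → β) (l : List α) :
    l.filterMap (fun x => if p x then some (f x) else none) = (l.filter p).map f := by
  induction l with
  | nil => rfl
  | cons a t ih => by_cases h : p a <;> simp [h, ih]

theorem map_index {β : Type} (P : List Int) (F : Int → β) :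
    (PySem.List.pyRange 0 (P.length : Int) 1).map (fun i => F (PySem.List.pyGetD P i 0)) = P.map F := by
  have h1 : (fun i => F (PySem.List.pyGetD P i 0))
      = F ∘ (fun i => PySem.List.pyGetD P i 0) := rfl
  rw [h1, ← List.map_map, PySem.List.map_pyGetD_pyRange_zero']

theorem set_loop {α : Type} (upd : Int → α → α) (d r0 : α) (m k : Nat) (hk : k ≤ m) :
    (PySem.List.pyRange 0 (k : Int) 1).foldl
      (fun sn i => PySem.List.pySetD sn i (upd i (PySem.List.pyGetD sn i d)))
      (List.replicate m r0)
    = (PySem.List.pyRange 0 (k : Int) 1).map (fun i => upd i r0) ++ List.replicate (m - k) r0 := by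
  induction k with
  | zero => simp [PySem.List.pyRange_one_eq_nil]
  | succ k ih =>
    have hk' : k ≤ m := Nat.le_of_succ_le hk
    have hsplit : PySem.List.pyRange 0 ((k + 1 : Nat) : Int) 1
        = PySem.List.pyRange 0 (k : Int) 1 ++ [(k : Int)] := by
      push_cast
      exact PySem.List.pyRange_one_succ_right (by exact_mod_cast Nat.zero_le k)
    rw [hsplit, List.foldl_append, ih hk', List.map_append]
    set A := (PySem.List.pyRange 0 (k : Int) 1).map (fun i => upd i r0) with hA
    have hAlen : A.length = k := by
      simp [hA, PySem.List.length_pyRange_one]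
    have hrep : List.replicate (m - k) r0 = r0 :: List.replicate (m - k - 1) r0 := by
      rw [← List.replicate_succ]; congr 1; omega
    simp only [List.foldl_cons, List.foldl_nil]
    rw [hrep]
    have hget : PySem.List.pyGetD (A ++ r0 :: List.replicate (m - k - 1) r0) (k : Int) d = r0 := by
      rw [PySem.List.pyGetD_natCast, List.getD, List.getElem?_append_right (by omega)]
      simp [hAlen]
    have hset : PySem.List.pySetD (A ++ r0 :: List.replicate (m - k - 1) r0) (k : Int) (upd (k : Int) r0)
        = A ++ (upd (k : Int) r0) :: List.replicate (m - k - 1) r0 := by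
      rw [PySem.List.pySetD_natCast, List.set_append]
      simp [hAlen]
    rw [hget, hset]
    have hmk : m - (k + 1) = m - k - 1 := by omega
    simp only [List.map_cons, List.map_nil, hmk, List.append_assoc, List.singleton_append]

theorem row_sets (a b c w L R : String) (rest : List String) :
    PySem.List.pySetD (PySem.List.pySetD (PySem.List.pySetD (a :: b :: c :: rest) 0 L) 1 w) 2 R
      = L :: w :: R :: rest := by
  rw [show (0 : Int) = ((0 : Nat) : Int) from rfl, show (1 : Int) = ((1 : Nat) : Int) from rfl,
      show (2 : Int) = ((2 : Nat) : Int) from rfl,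
      PySem.List.pySetD_natCast, PySem.List.pySetD_natCast, PySem.List.pySetD_natCast]
  rfl

theorem row_get0 (L w R : String) (rest : List String) :
    PySem.List.pyGetD (L :: w :: R :: rest) 0 "" = L := by
  rw [show (0 : Int) = ((0 : Nat) : Int) from rfl, PySem.List.pyGetD_natCast]; rfl

theorem row_get2 (L w R : String) (rest : List String) :
    PySem.List.pyGetD (L :: w :: R :: rest) 2 "" = R := by
  rw [show (2 : Int) = ((2 : Nat) : Int) from rfl, PySem.List.pyGetD_natCast]; rfl

theorem left_eq (lst : List String) (num p : Int) (_h : 0 ≤ p) :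
    (if p < num + 1 then PySem.Str.join " " (PySem.List.slice lst none (some p))
     else PySem.Str.join " " (PySem.List.slice lst (some (p - num)) (some p)))
    = PySem.Str.join " " (PySem.List.slice lst (some (max 0 (p - num))) (some p)) := by
  split_ifs with hc
  · have hm : max 0 (p - num) = 0 := by omega
    rw [hm, PySem.List.slice_zero_start]
  · have hm : max 0 (p - num) = p - num := by omega
    rw [hm]

theorem right_eq (lst : List String) (num p : Int) (h3 : 3 ≤ num) (h0 : 0 ≤ p)
    (hp : p < (lst.length : Int)) :
    (if p > (lst.length : Int) - (num + 2) then PySem.Str.join " " (PySem.List.slice lst (some (p + 1)) none)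
     else PySem.Str.join " " (PySem.List.slice lst (some (p + 1)) (some (p + 1 + num))))
    = PySem.Str.join " " (PySem.List.slice lst (some (p + 1)) (some (p + 1 + num))) := by
  split_ifs with hc
  · congr 1
    rw [PySem.List.slice_from lst (by omega), PySem.List.slice_toNat lst (by omega) (by omega)]
    rw [List.take_of_length_le]
    simp only [List.length_drop]
    omega
  · rfl

def Lctx (lst : List String) (num p : Int) : String :=
  PySem.Str.join " " (PySem.List.slice lst (some (max 0 (p - num))) (some p))

def Rctx (lst : List String) (num p : Int) : String :=
  PySem.Str.join " " (PySem.List.slice lst (some (p + 1)) (some (p + 1 + num)))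

def rowA (lst : List String) (word : String) (num p : Int) : List String :=
  Lctx lst num p :: word :: Rctx lst num p :: (PySem.List.pyRange 3 num 1).map (fun _ : Int => "")

theorem kwiq_core (word : String) (lst : List String) (num : Int) (h3 : 3 ≤ num) :
    (to_table
      ((PySem.List.pyRange 0
          ((((List.range ((PySem.List.pyRange 0 (lst.length : Int) 1).foldl
                (fun ps i => if PySem.List.pyGetD lst i "" == word then ps ++ [i] else ps) []).length).map
              (fun _ => (PySem.List.pyRange 0 num 1).map (fun _ => ""))).length : Int)) 1).foldl
        (fun sn i =>
          PySem.List.pySetD sn i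
            (PySem.List.pySetD
              (PySem.List.pySetD
                (PySem.List.pySetD (PySem.List.pyGetD sn i []) 0
                  (if PySem.List.pyGetD ((PySem.List.pyRange 0 (lst.length : Int) 1).foldl
                        (fun ps i => if PySem.List.pyGetD lst i "" == word then ps ++ [i] else ps) []) i 0 < num + 1 then
                     PySem.Str.join " " (PySem.List.slice lst none
                       (some (PySem.List.pyGetD ((PySem.List.pyRange 0 (lst.length : Int) 1).foldl
                          (fun ps i => if PySem.List.pyGetD lst i "" == word then ps ++ [i] else ps) []) i 0)))
                   else
                     PySem.Str.join " " (PySem.List.slice lst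
                       (some ((PySem.List.pyGetD ((PySem.List.pyRange 0 (lst.length : Int) 1).foldl
                          (fun ps i => if PySem.List.pyGetD lst i "" == word then ps ++ [i] else ps) []) i 0) - num))
                       (some (PySem.List.pyGetD ((PySem.List.pyRange 0 (lst.length : Int) 1).foldl
                          (fun ps i => if PySem.List.pyGetD lst i "" == word then ps ++ [i] else ps) []) i 0)))))
                1 word)
              2
              (if PySem.List.pyGetD ((PySem.List.pyRange 0 (lst.length : Int) 1).foldl
                    (fun ps i => if PySem.List.pyGetD lst i "" == word then ps ++ [i] else ps) []) i 0 >
                  (lst.length : Int) - (num + 2) then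
                 PySem.Str.join " " (PySem.List.slice lst
                   (some ((PySem.List.pyGetD ((PySem.List.pyRange 0 (lst.length : Int) 1).foldl
                      (fun ps i => if PySem.List.pyGetD lst i "" == word then ps ++ [i] else ps) []) i 0) + 1)) none)
               else
                 PySem.Str.join " " (PySem.List.slice lst
                   (some ((PySem.List.pyGetD ((PySem.List.pyRange 0 (lst.length : Int) 1).foldl
                      (fun ps i => if PySem.List.pyGetD lst i "" == word then ps ++ [i] else ps) []) i 0) + 1))
                   (some ((PySem.List.pyGetD ((PySem.List.pyRange 0 (lst.length : Int) 1).foldl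
                      (fun ps i => if PySem.List.pyGetD lst i "" == word then ps ++ [i] else ps) []) i 0) + 1 + num))))))
        ((List.range ((PySem.List.pyRange 0 (lst.length : Int) 1).foldl
            (fun ps i => if PySem.List.pyGetD lst i "" == word then ps ++ [i] else ps) []).length).map
          (fun _ => (PySem.List.pyRange 0 num 1).map (fun _ => ""))))
      word)
    =
    (((PySem.List.enumerate lst 0).filterMap
        (fun iw => if iw.2 == word then
            some (PySem.Str.join " " (PySem.List.slice lst (some (max 0 (iw.1 - num))) (some iw.1)),
                  PySem.Str.join " " (PySem.List.slice lst (some (iw.1 + 1)) (some (iw.1 + 1 + num))))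
          else none)).map
      (fun s => pyRjust s.1
          ((PySem.List.max? (((PySem.List.enumerate lst 0).filterMap
              (fun iw => if iw.2 == word then
                  some (PySem.Str.join " " (PySem.List.slice lst (some (max 0 (iw.1 - num))) (some iw.1)),
                        PySem.Str.join " " (PySem.List.slice lst (some (iw.1 + 1)) (some (iw.1 + 1 + num))))
                else none)).map (fun s => PySem.Str.len s.1)) (fun x => x)).getD 0)
        ++ "\t" ++ word ++ "\t" ++ s.2 ++ "\n")) := by
  set P := (PySem.List.pyRange 0 (lst.length : Int) 1).foldl
      (fun ps i => if PySem.List.pyGetD lst i "" == word then ps ++ [i] else ps) [] with hP0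
  have hP : P = (PySem.List.pyRange 0 (lst.length : Int) 1).filter
      (fun i => PySem.List.pyGetD lst i "" == word) := by
    rw [hP0, PySem.List.foldl_append_if_eq_filter]
    rfl
  have hmem : ∀ p ∈ P, 0 ≤ p ∧ p < (lst.length : Int) := by
    intro p hp
    rw [hP] at hp
    have := (List.mem_filter.mp hp).1
    exact PySem.List.mem_pyRange_one.mp this
  -- B side: enumerate-filterMap = P.map
  have hB : (PySem.List.enumerate lst 0).filterMap
        (fun iw => if iw.2 == word then
            some (PySem.Str.join " " (PySem.List.slice lst (some (max 0 (iw.1 - num))) (some iw.1)),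
                  PySem.Str.join " " (PySem.List.slice lst (some (iw.1 + 1)) (some (iw.1 + 1 + num))))
          else none)
      = P.map (fun p => (Lctx lst num p, Rctx lst num p)) := by
    rw [PySem.List.enumerate_eq_map_pyRange lst "", List.filterMap_map]
    simp only [Function.comp_def, PySem.List.len_eq]
    rw [filterMap_ite (fun j => PySem.List.pyGetD lst j "" == word)
        (fun j => (PySem.Str.join " " (PySem.List.slice lst (some (max 0 (j - num))) (some j)),
                   PySem.Str.join " " (PySem.List.slice lst (some (j + 1)) (some (j + 1 + num)))))]
    rw [hP]
    simp only [Lctx, Rctx]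
  have hrow0 : (PySem.List.pyRange 0 num 1).map (fun _ : Int => "")
      = "" :: "" :: "" :: (PySem.List.pyRange 3 num 1).map (fun _ : Int => "") := by
    rw [PySem.List.pyRange_one_cons (show (0:Int) < num by omega),
        PySem.List.pyRange_one_cons (show (0:Int) + 1 < num by omega),
        PySem.List.pyRange_one_cons (show (0:Int) + 1 + 1 < num by omega)]
    norm_num
  have hsn0 : (List.range P.length).map (fun _ => (PySem.List.pyRange 0 num 1).map (fun _ : Int => ""))
      = List.replicate P.length ("" :: "" :: "" :: (PySem.List.pyRange 3 num 1).map (fun _ : Int => "")) := by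
    rw [hrow0, List.map_const', List.length_range]
  rw [hsn0]
  simp only [List.length_replicate]
  rw [set_loop
      (fun i r =>
        PySem.List.pySetD
          (PySem.List.pySetD
            (PySem.List.pySetD r 0
              (if PySem.List.pyGetD P i 0 < num + 1 then
                 PySem.Str.join " " (PySem.List.slice lst none (some (PySem.List.pyGetD P i 0)))
               else
                 PySem.Str.join " " (PySem.List.slice lst (some ((PySem.List.pyGetD P i 0) - num))
                   (some (PySem.List.pyGetD P i 0)))))
            1 word)
          2
          (if PySem.List.pyGetD P i 0 > (lst.length : Int) - (num + 2) then
             PySem.Str.join " " (PySem.List.slice lst (some ((PySem.List.pyGetD P i 0) + 1)) none)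
           else
             PySem.Str.join " " (PySem.List.slice lst (some ((PySem.List.pyGetD P i 0) + 1))
               (some ((PySem.List.pyGetD P i 0) + 1 + num)))))
      [] ("" :: "" :: "" :: (PySem.List.pyRange 3 num 1).map (fun _ : Int => ""))
      P.length P.length le_rfl]
  simp only [Nat.sub_self, List.replicate_zero, List.append_nil]
  have hS : (PySem.List.pyRange 0 (P.length : Int) 1).map
        (fun i =>
          PySem.List.pySetD
            (PySem.List.pySetD
              (PySem.List.pySetD ("" :: "" :: "" :: (PySem.List.pyRange 3 num 1).map (fun _ : Int => "")) 0
                (if PySem.List.pyGetD P i 0 < num + 1 then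
                   PySem.Str.join " " (PySem.List.slice lst none (some (PySem.List.pyGetD P i 0)))
                 else
                   PySem.Str.join " " (PySem.List.slice lst (some ((PySem.List.pyGetD P i 0) - num))
                     (some (PySem.List.pyGetD P i 0)))))
              1 word)
            2
            (if PySem.List.pyGetD P i 0 > (lst.length : Int) - (num + 2) then
               PySem.Str.join " " (PySem.List.slice lst (some ((PySem.List.pyGetD P i 0) + 1)) none)
             else
               PySem.Str.join " " (PySem.List.slice lst (some ((PySem.List.pyGetD P i 0) + 1))
                 (some ((PySem.List.pyGetD P i 0) + 1 + num)))))
      = (PySem.List.pyRange 0 (P.length : Int) 1).map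
        (fun i => rowA lst word num (PySem.List.pyGetD P i 0)) := by
    apply List.map_congr_left
    intro i hi
    obtain ⟨hi0, hi1⟩ := PySem.List.mem_pyRange_one.mp hi
    have hpin : PySem.Raise.InRange P.length i := by
      simp [PySem.Raise.InRange]
      omega
    obtain ⟨hp0, hp1⟩ := hmem _ (PySem.List.pyGetD_mem P 0 hpin)
    rw [row_sets, left_eq lst num _ hp0, right_eq lst num _ h3 hp0 hp1]
    simp only [rowA, Lctx, Rctx]
  rw [hS]
  simp only [to_table, List.length_map, PySem.List.length_pyRange_one, Int.sub_zero,
    Int.toNat_natCast]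
  rw [PySem.List.foldl_append_singleton_eq_map, List.nil_append]
  have hget : ∀ (i : Int), 0 ≤ i → i < (P.length : Int) →
      PySem.List.pyGetD ((PySem.List.pyRange 0 (P.length : Int) 1).map
        (fun j => rowA lst word num (PySem.List.pyGetD P j 0))) i []
      = rowA lst word num (PySem.List.pyGetD P i 0) := by
    intro i h0 h1
    exact PySem.List.pyGetD_map_pyRange_of_nonneg _ _ _ _ h0 h1
  have hrowget0 : ∀ p : Int, PySem.List.pyGetD (rowA lst word num p) 0 "" = Lctx lst num p := by
    intro p
    rw [rowA, row_get0]
  have hrowget2 : ∀ p : Int, PySem.List.pyGetD (rowA lst word num p) 2 "" = Rctx lst num p := by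
    intro p
    rw [rowA, row_get2]
  have hW : (PySem.List.pyRange 0 (P.length : Int) 1).map
        (fun i => PySem.Str.len (PySem.List.pyGetD (PySem.List.pyGetD
          ((PySem.List.pyRange 0 (P.length : Int) 1).map
            (fun j => rowA lst word num (PySem.List.pyGetD P j 0))) i []) 0 ""))
      = P.map (fun p => PySem.Str.len (Lctx lst num p)) := by
    calc (PySem.List.pyRange 0 (P.length : Int) 1).map
          (fun i => PySem.Str.len (PySem.List.pyGetD (PySem.List.pyGetD
            ((PySem.List.pyRange 0 (P.length : Int) 1).map
              (fun j => rowA lst word num (PySem.List.pyGetD P j 0))) i []) 0 ""))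
        = (PySem.List.pyRange 0 (P.length : Int) 1).map
          (fun i => PySem.Str.len (Lctx lst num (PySem.List.pyGetD P i 0))) := by
          apply List.map_congr_left
          intro i hi
          obtain ⟨h0, h1⟩ := PySem.List.mem_pyRange_one.mp hi
          rw [hget i h0 h1, hrowget0]
      _ = P.map (fun p => PySem.Str.len (Lctx lst num p)) := map_index P (fun p => PySem.Str.len (Lctx lst num p))
  rw [hW]
  simp only [pyCenter_self]
  rw [hB]
  simp only [List.map_map, Function.comp_def]
  have hT : (PySem.List.pyRange 0 (P.length : Int) 1).map
        (fun i =>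
          pyRjust (PySem.List.pyGetD (PySem.List.pyGetD
              ((PySem.List.pyRange 0 (P.length : Int) 1).map
                (fun j => rowA lst word num (PySem.List.pyGetD P j 0))) i []) 0 "")
            ((PySem.List.max? (P.map (fun p => PySem.Str.len (Lctx lst num p))) (fun x => x)).getD 0)
          ++ "\t" ++ word ++ "\t"
          ++ PySem.List.pyGetD (PySem.List.pyGetD
              ((PySem.List.pyRange 0 (P.length : Int) 1).map
                (fun j => rowA lst word num (PySem.List.pyGetD P j 0))) i []) 2 ""
          ++ "\n")
      = P.map (fun p =>
          pyRjust (Lctx lst num p)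
            ((PySem.List.max? (P.map (fun q => PySem.Str.len (Lctx lst num q))) (fun x => x)).getD 0)
          ++ "\t" ++ word ++ "\t" ++ Rctx lst num p ++ "\n") := by
    calc (PySem.List.pyRange 0 (P.length : Int) 1).map
          (fun i =>
            pyRjust (PySem.List.pyGetD (PySem.List.pyGetD
                ((PySem.List.pyRange 0 (P.length : Int) 1).map
                  (fun j => rowA lst word num (PySem.List.pyGetD P j 0))) i []) 0 "")
              ((PySem.List.max? (P.map (fun p => PySem.Str.len (Lctx lst num p))) (fun x => x)).getD 0)
            ++ "\t" ++ word ++ "\t"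
            ++ PySem.List.pyGetD (PySem.List.pyGetD
                ((PySem.List.pyRange 0 (P.length : Int) 1).map
                  (fun j => rowA lst word num (PySem.List.pyGetD P j 0))) i []) 2 ""
            ++ "\n")
        = (PySem.List.pyRange 0 (P.length : Int) 1).map
          (fun i =>
            pyRjust (Lctx lst num (PySem.List.pyGetD P i 0))
              ((PySem.List.max? (P.map (fun q => PySem.Str.len (Lctx lst num q))) (fun x => x)).getD 0)
            ++ "\t" ++ word ++ "\t" ++ Rctx lst num (PySem.List.pyGetD P i 0) ++ "\n") := by
          apply List.map_congr_left
          intro i hi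
          obtain ⟨h0, h1⟩ := PySem.List.mem_pyRange_one.mp hi
          rw [hget i h0 h1, hrowget0, hrowget2]
      _ = P.map (fun p =>
            pyRjust (Lctx lst num p)
              ((PySem.List.max? (P.map (fun q => PySem.Str.len (Lctx lst num q))) (fun x => x)).getD 0)
            ++ "\t" ++ word ++ "\t" ++ Rctx lst num p ++ "\n") :=
          map_index P (fun p =>
            pyRjust (Lctx lst num p)
              ((PySem.List.max? (P.map (fun q => PySem.Str.len (Lctx lst num q))) (fun x => x)).getD 0)
            ++ "\t" ++ word ++ "\t" ++ Rctx lst num p ++ "\n")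
  rw [hT]

-- ----- bridge from B's two streaming folds to the enumerate/filterMap form -----

-- the sliding window of the forward pass is the last `num` words of the processed prefix
theorem left_window_slice (pre t : List String) (num : Int) (h0 : 0 ≤ num) :
    PySem.List.slice (pre ++ t) (some (max 0 ((pre.length : Int) - num))) (some (pre.length : Int))
      = pre.drop (pre.length - num.toNat) := by
  rw [PySem.List.slice_toNat _ (by omega) (by exact_mod_cast Nat.zero_le pre.length)]
  have ha : (max 0 ((pre.length : Int) - num)).toNat = pre.length - num.toNat := by omega
  have hp : (pre.length : Int).toNat = pre.length := by omega
  rw [ha, hp, List.drop_append_of_le_length (by omega)]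
  rw [List.take_left' (by simp)]

theorem lefts_fold (word : String) (num : Int) (h3 : 3 ≤ num) :
    ∀ (t pre acc : List String),
    t.foldl
      (fun (s : List String × List String) w =>
        let lefts := if w == word then s.1 ++ [PySem.Str.join " " s.2] else s.1
        let window := s.2 ++ [w]
        (lefts, if (window.length : Int) > num then window.drop 1 else window))
      (acc, pre.drop (pre.length - num.toNat))
    = (acc ++ (PySem.List.enumerate t (pre.length : Int)).filterMap
          (fun iw => if iw.2 == word then
             some (PySem.Str.join " " (PySem.List.slice (pre ++ t) (some (max 0 (iw.1 - num))) (some iw.1)))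
           else none),
       (pre ++ t).drop ((pre ++ t).length - num.toNat)) := by
  intro t
  induction t with
  | nil => intro pre acc; simp [PySem.List.enumerate_nil]
  | cons h t ih =>
    intro pre acc
    have hwin : (if ((pre.drop (pre.length - num.toNat) ++ [h]).length : Int) > num then
          (pre.drop (pre.length - num.toNat) ++ [h]).drop 1
        else pre.drop (pre.length - num.toNat) ++ [h])
        = (pre ++ [h]).drop ((pre ++ [h]).length - num.toNat) := by
      have hd : pre.drop (pre.length - num.toNat) ++ [h]
          = (pre ++ [h]).drop (pre.length - num.toNat) := by
        rw [List.drop_append_of_le_length (by omega)]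
      rw [hd]
      simp only [List.length_append, List.length_drop, List.length_cons, List.length_nil]
      split_ifs with hc
      · rw [List.drop_drop]
        congr 1
        omega
      · congr 1
        omega
    have hleft : PySem.Str.join " " (pre.drop (pre.length - num.toNat))
        = PySem.Str.join " " (PySem.List.slice (pre ++ h :: t)
            (some (max 0 ((pre.length : Int) - num))) (some (pre.length : Int))) := by
      rw [left_window_slice pre (h :: t) num (by omega)]
    simp only [List.foldl_cons]
    rw [hwin]
    rw [ih (pre ++ [h]) (if h == word then acc ++ [PySem.Str.join " " (pre.drop (pre.length - num.toNat))] else acc)]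
    rw [PySem.List.enumerate_cons, List.filterMap_cons]
    have hlen1 : ((pre ++ [h]).length : Int) = (pre.length : Int) + 1 := by simp
    simp only [hlen1, List.append_assoc, List.singleton_append]
    by_cases hw : h == word
    · simp only [hw]
      rw [hleft]
      simp
    · simp only [hw]
      simp

-- proof-side recursive description of the backward pass
def matchesR (word : String) (num : Int) : List String → List String → List String
  | [], _ => []
  | h :: r, suf =>
      (if h == word then [PySem.Str.join " " (suf.take num.toNat)] else [])
        ++ matchesR word num r (h :: suf)

theorem rights_fold (word : String) (num : Int) (h3 : 3 ≤ num) :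
    ∀ (r suf acc : List String),
    r.foldl
      (fun (s : List String × List String) w =>
        let rights := if w == word then s.1 ++ [PySem.Str.join " " s.2] else s.1
        let ahead := w :: s.2
        (rights, if (ahead.length : Int) > num then ahead.take num.toNat else ahead))
      (acc, suf.take num.toNat)
    = (acc ++ matchesR word num r suf, (r.reverse ++ suf).take num.toNat) := by
  intro r
  induction r with
  | nil => intro suf acc; simp [matchesR]
  | cons h r ih =>
    intro suf acc
    have hahead : (if ((h :: suf.take num.toNat).length : Int) > num then
          (h :: suf.take num.toNat).take num.toNat
        else h :: suf.take num.toNat)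
        = (h :: suf).take num.toNat := by
      simp only [List.length_cons, List.length_take]
      split_ifs with hc
      · obtain ⟨m, hm⟩ : ∃ m, num.toNat = m + 1 := ⟨num.toNat - 1, by omega⟩
        rw [hm]
        simp only [List.take_succ_cons, List.take_take]
        congr 2
        omega
      · have : suf.length ≤ num.toNat := by omega
        rw [List.take_of_length_le this, List.take_of_length_le (by simpa using by omega)]
    simp only [List.foldl_cons]
    rw [hahead, ih (h :: suf)
        (if h == word then acc ++ [PySem.Str.join " " (suf.take num.toNat)] else acc)]
    simp only [matchesR, List.reverse_cons, List.append_assoc, List.singleton_append]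
    by_cases hw : h == word
    · simp [hw]
    · simp [hw]

theorem matchesR_eq (word : String) (num : Int) (h0 : 0 ≤ num) :
    ∀ (r suf : List String),
    matchesR word num r suf
      = ((PySem.List.enumerate r.reverse 0).filterMap
          (fun iw => if iw.2 == word then
             some (PySem.Str.join " " (PySem.List.slice (r.reverse ++ suf)
                     (some (iw.1 + 1)) (some (iw.1 + 1 + num))))
           else none)).reverse := by
  intro r
  induction r with
  | nil => intro suf; simp [matchesR, PySem.List.enumerate_nil]
  | cons h r ih =>
    intro suf
    have hslice : PySem.List.slice (r.reverse ++ h :: suf)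
          (some ((r.reverse.length : Int) + 1)) (some ((r.reverse.length : Int) + 1 + num))
        = suf.take num.toNat := by
      rw [PySem.List.slice_toNat _ (by omega) (by omega)]
      have h1 : ((r.reverse.length : Int) + 1).toNat = r.reverse.length + 1 := by omega
      have h2 : ((r.reverse.length : Int) + 1 + num).toNat - ((r.reverse.length : Int) + 1).toNat
          = num.toNat := by omega
      rw [h2, h1]
      have hd : (r.reverse ++ h :: suf).drop (r.reverse.length + 1) = suf := by
        rw [List.drop_length_add_append 1]
        rfl
      rw [hd]
    simp only [matchesR, List.reverse_cons]
    rw [PySem.List.enumerate_append, List.filterMap_append, List.reverse_append]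
    have hlast : ((PySem.List.enumerate [h] ((0 : Int) + r.reverse.length)).filterMap
          (fun iw => if iw.2 == word then
             some (PySem.Str.join " " (PySem.List.slice ((r.reverse ++ [h]) ++ suf)
                     (some (iw.1 + 1)) (some (iw.1 + 1 + num))))
           else none)).reverse
        = (if h == word then [PySem.Str.join " " (suf.take num.toNat)] else []) := by
      simp only [PySem.List.enumerate_cons, PySem.List.enumerate_nil, List.filterMap_cons,
        List.filterMap_nil, Int.zero_add]
      by_cases hw : h == word
      · simp only [hw]
        rw [List.append_assoc, List.singleton_append, hslice]
        rfl
      · simp [hw]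
    rw [hlast]
    congr 1
    rw [ih (h :: suf)]
    congr 2
    funext iw
    rw [List.append_assoc, List.singleton_append]

theorem kwiq_alt_expand (word : String) (text : String) (num : Int) (h3 : 3 ≤ num) :
    kwiq_alt word text num
      = (((PySem.List.enumerate (PySem.Str.split₀ (PySem.Str.lower text)) 0).filterMap
          (fun iw => if iw.2 == word then
              some (PySem.Str.join " " (PySem.List.slice (PySem.Str.split₀ (PySem.Str.lower text)) (some (max 0 (iw.1 - num))) (some iw.1)),
                    PySem.Str.join " " (PySem.List.slice (PySem.Str.split₀ (PySem.Str.lower text)) (some (iw.1 + 1)) (some (iw.1 + 1 + num))))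
            else none)).map
        (fun s => pyRjust s.1
            ((PySem.List.max? (((PySem.List.enumerate (PySem.Str.split₀ (PySem.Str.lower text)) 0).filterMap
                (fun iw => if iw.2 == word then
                    some (PySem.Str.join " " (PySem.List.slice (PySem.Str.split₀ (PySem.Str.lower text)) (some (max 0 (iw.1 - num))) (some iw.1)),
                          PySem.Str.join " " (PySem.List.slice (PySem.Str.split₀ (PySem.Str.lower text)) (some (iw.1 + 1)) (some (iw.1 + 1 + num))))
                  else none)).map (fun s => PySem.Str.len s.1)) (fun x => x)).getD 0)
          ++ "\t" ++ word ++ "\t" ++ s.2 ++ "\n")) := by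
  set lst := PySem.Str.split₀ (PySem.Str.lower text) with hlst
  have hL := lefts_fold word num h3 lst [] []
  simp only [List.drop_nil, List.length_nil, Nat.zero_sub, Nat.cast_zero, List.nil_append] at hL
  have hR := rights_fold word num h3 lst.reverse [] []
  simp only [List.take_nil, List.nil_append] at hR
  have hM := matchesR_eq word num (by omega) lst.reverse []
  simp only [List.reverse_reverse, List.append_nil] at hM
  simp only [kwiq_alt, ← hlst]
  rw [hL, hR, hM, List.reverse_reverse]
  rw [filterMap_ite (fun iw : Int × String => iw.2 == word)
        (fun iw => PySem.Str.join " " (PySem.List.slice lst (some (max 0 (iw.1 - num))) (some iw.1))),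
      filterMap_ite (fun iw : Int × String => iw.2 == word)
        (fun iw => PySem.Str.join " " (PySem.List.slice lst (some (iw.1 + 1)) (some (iw.1 + 1 + num)))),
      filterMap_ite (fun iw : Int × String => iw.2 == word)
        (fun iw => (PySem.Str.join " " (PySem.List.slice lst (some (max 0 (iw.1 - num))) (some iw.1)),
                    PySem.Str.join " " (PySem.List.slice lst (some (iw.1 + 1)) (some (iw.1 + 1 + num)))))]
  rw [List.zip_map']
  simp only [List.map_map, Function.comp_def]

-- ===== VERDICT (by name: the statement is the Claim_ definition above) =====
theorem kwiq_spec : Claim_equal_kwiq := by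
  intro word text num _ hpre
  show kwiq word text num = kwiq_alt word text num
  rw [kwiq_alt_expand word text num hpre.1]
  exact kwiq_core word (PySem.Str.split₀ (PySem.Str.lower text)) num hpre.1
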